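-- pv_equiv track=rewrite | github.com/nalwayv/MyLeetCode | Leet 1957/solution.py | makeFancyString
-- ===== SOURCE A (Python) =====
-- def makeFancyString(s: str) -> str:
--     """
--     Returns a 'fancy' version of the input string `s` where no three consecutive characters are the same.
--     Args:
--         s (str): The input string.
--     Returns:
--         str: The modified string with no three consecutive identical characters.
--     """
--     result: list[str] = []
--     n: int = len(s)
--
--     lo: int = 0
--     for hi in range(n):
--         if s[lo] != s[hi]:
--             lo = hi
--
--         if (hi - lo) < 2:
--             result.append(s[lo])
--
--     return "".join(result)
-- ===== SOURCE B (Python) =====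
-- def makeFancyString(s: str) -> str:
--     # Stateless filter: s[i] is dropped exactly when it equals both of the two
--     # preceding *input* characters (i.e. it is the 3rd+ char of a run); this is a
--     # closed-form per-index predicate, no loop state is maintained.
--     return "".join(c for i, c in enumerate(s) if i < 2 or c != s[i - 1] or c != s[i - 2])
-- ===== Notes on version B (the rewrite author's own statement) =====
-- stated objective: idiomatic
-- what changed: B replaces A's stateful lo/hi run-window loop by a stateless per-index filter: a character is kept iff it does not equal both of the two preceding input characters, so no loop state (run start) is maintained at all.
import Mathlib
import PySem

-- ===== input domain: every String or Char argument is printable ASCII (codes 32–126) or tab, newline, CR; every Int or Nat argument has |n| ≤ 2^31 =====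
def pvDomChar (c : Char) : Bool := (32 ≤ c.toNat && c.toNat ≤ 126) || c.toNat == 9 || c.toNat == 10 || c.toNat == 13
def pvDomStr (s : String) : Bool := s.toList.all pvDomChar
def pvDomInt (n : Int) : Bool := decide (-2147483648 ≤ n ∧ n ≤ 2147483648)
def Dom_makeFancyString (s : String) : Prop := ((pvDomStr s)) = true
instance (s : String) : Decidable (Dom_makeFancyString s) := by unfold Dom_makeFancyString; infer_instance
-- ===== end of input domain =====

-- B replaces A's stateful lo/hi run-window loop by a stateless per-index filter
-- (keep s[i] unless it equals both of the two preceding input characters); objective: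
-- idiomatic, same O(n) cost.

-- ===== PORT A =====
-- A's for-loop over `range(n)`; `lo`/`hi` always index inside s, so `getD _ ' '` is exact.
def loopA (cs : List Char) (idxs : List Nat) (lo : Nat) (acc : List Char) : List Char :=
  match idxs with
  | [] => acc
  | hi :: t =>
    let lo' := if cs.getD lo ' ' ≠ cs.getD hi ' ' then hi else lo
    let acc' := if hi - lo' < 2 then acc ++ [cs.getD lo' ' '] else acc
    loopA cs t lo' acc'

def makeFancyString (s : String) : String :=
  String.mk (loopA s.toList (List.range s.toList.length) 0 [])

-- ===== PORT B =====
-- Source B's comprehension filter over enumerate(s); `s[i-1]`/`s[i-2]` are only reached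
-- for i ≥ 2, where they index inside s, so `getD (·.toNat) ' '` is exact.
def predB (cs : List Char) (p : Int × Char) : Bool :=
  decide (p.1 < 2) || !(p.2 == cs.getD (p.1 - 1).toNat ' ') || !(p.2 == cs.getD (p.1 - 2).toNat ' ')

def makeFancyString_alt (s : String) : String :=
  String.mk (((PySem.List.enumerate s.toList 0).filter (predB s.toList)).map (·.2))

-- ===== PRECONDITION & SPEC =====
def Spec_makeFancyString (s : String) (out : String) : Prop := out = makeFancyString_alt s
instance (s : String) (out : String) : Decidable (Spec_makeFancyString s out) := by unfold Spec_makeFancyString; infer_instance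

-- ===== CLAIM (what is proved, stated in full; the proofs are below) =====
def Claim_equal_makeFancyString : Prop := ∀ (s : String), Dom_makeFancyString s → Spec_makeFancyString s (makeFancyString s)

-- ===== LEMMAS AND PROOFS =====

-- Invariant linking A's state (run start lo, next index k) with B's stateless filter on
-- the remaining suffix: cs[lo..k-1] is a run of cs[lo], and lo is maximal
-- (lo > 0 → cs[lo-1] ≠ cs[lo]).
theorem loop_agree (m : Nat) : ∀ (cs : List Char) (k lo : Nat) (acc : List Char),
    k + m = cs.length →
    (k = 0 → lo = 0) →
    (0 < k → lo < k) →
    (∀ j, lo ≤ j → j < k → cs.getD j ' ' = cs.getD lo ' ') →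
    (0 < lo → cs.getD (lo - 1) ' ' ≠ cs.getD lo ' ') →
    loopA cs (List.range' k m) lo acc
      = acc ++ ((PySem.List.enumerate (cs.drop k) (k : Int)).filter (predB cs)).map (·.2) := by
  induction m with
  | zero =>
    intro cs k lo acc hlen _ _ _ _
    have hd : cs.drop k = [] := List.drop_eq_nil_of_le (by omega)
    simp [loopA, hd, PySem.List.enumerate_nil, List.range']
  | succ m ih =>
    intro cs k lo acc hlen h0 hlt hrun hmax
    have hk : k < cs.length := by omega
    have hdrop : cs.drop k = cs.getD k ' ' :: cs.drop (k + 1) := by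
      rw [List.drop_eq_getElem_cons hk, List.getD_eq_getElem cs ' ' hk]
    rw [List.range'_succ, hdrop, PySem.List.enumerate_cons]
    simp only [loopA]
    -- compute B's predicate at index k
    have hpred : predB cs ((k : Int), cs.getD k ' ')
        = (decide (k < 2) || !(cs.getD k ' ' == cs.getD (k - 1) ' ') ||
           !(cs.getD k ' ' == cs.getD (k - 2) ' ')) := by
      by_cases h2 : k < 2
      · simp [predB, h2]
        exact Or.inl (Or.inl (by omega))
      · have e1 : ((k : Int) - 1).toNat = k - 1 := by omega
        have e2 : ((k : Int) - 2).toNat = k - 2 := by omega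
        simp only [predB, e1, e2]
        rw [decide_eq_false (by exact_mod_cast (by omega : ¬ (k:Int) < 2)),
          decide_eq_false (by omega : ¬ k < 2)]
    by_cases heq : cs.getD lo ' ' = cs.getD k ' '
    · -- the run continues: A keeps lo
      rw [if_neg (not_not_intro heq)]
      have hlo : lo ≤ k := by
        rcases Nat.eq_zero_or_pos k with h | h
        · omega
        · exact Nat.le_of_lt (hlt h)
      have hrec : ∀ acc2, loopA cs (List.range' (k + 1) m) lo acc2
          = acc2 ++ ((PySem.List.enumerate (cs.drop (k + 1)) ((k : Int) + 1)).filter (predB cs)).map (·.2) := by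
        intro acc2
        have := ih cs (k + 1) lo acc2 (by omega) (by omega) (by omega)
          (by intro j h1 h2
              rcases Nat.lt_succ_iff_lt_or_eq.mp h2 with h | h
              · exact hrun j h1 h
              · subst h; exact heq.symm)
          hmax
        rw [this]; norm_num
      have hkeep : predB cs ((k : Int), cs.getD k ' ') = decide (k - lo < 2) := by
        rw [hpred]
        by_cases h2 : k < 2
        · simp [h2, show k - lo < 2 by omega]
        · have hk1 : cs.getD (k - 1) ' ' = cs.getD lo ' ' := hrun (k - 1) (by omega) (by omega)
          by_cases hlo2 : lo ≤ k - 2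
          · have hk2 : cs.getD (k - 2) ' ' = cs.getD lo ' ' := hrun (k - 2) hlo2 (by omega)
            simp [h2, show ¬ (k - lo < 2) by omega]
            exact ⟨(hk1.trans heq).symm, (hk2.trans heq).symm⟩
          · -- lo = k - 1
            have hloe : lo = k - 1 := by omega
            have hk2 : cs.getD (k - 2) ' ' ≠ cs.getD k ' ' := by
              have h1 := hmax (by omega)
              rw [hloe, show k - 1 - 1 = k - 2 from by omega] at h1
              exact fun h => h1 (h.trans (heq.symm.trans hk1.symm))
            simp [h2, show k - lo < 2 by omega]
            exact Or.inr (fun h => hk2 h.symm)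
      rw [List.filter_cons, hkeep]
      by_cases h2 : k - lo < 2
      · rw [if_pos h2]
        simp only [decide_eq_true h2, if_pos, List.map_cons]
        rw [hrec, heq]
        simp
      · rw [if_neg h2]
        simp only [decide_eq_false h2]
        rw [if_neg (by simp), hrec]
    · -- a new run starts at k: A sets lo := k and appends
      have hk0 : k ≠ 0 := by
        intro h; subst h; exact heq (by rw [h0 rfl])
      have hk1 : cs.getD (k - 1) ' ' = cs.getD lo ' ' := hrun (k - 1) (by have := hlt (by omega); omega) (by omega)
      have hkeep : predB cs ((k : Int), cs.getD k ' ') = true := by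
        rw [hpred]
        by_cases h2 : k < 2
        · simp [h2]
        · simp [h2]
          exact Or.inl (fun h => heq (hk1.symm.trans (Eq.symm h)))
      rw [if_pos (by simpa using heq), if_pos (show k - k < 2 by omega)]
      rw [List.filter_cons, hkeep]
      simp only [if_pos, List.map_cons]
      have hr := ih cs (k + 1) k (acc ++ [cs.getD k ' ']) (by omega) (by omega) (by omega)
        (fun j h1 h2 => congrArg (fun i => List.getD cs i ' ') (Nat.le_antisymm (Nat.lt_succ_iff.mp h2) h1))
        (by intro _; rw [hk1]; exact fun h => heq h)
      rw [hr, List.append_cons]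
      norm_num

-- ===== VERDICT (by name: the statement is the Claim_ definition above) =====
theorem makeFancyString_spec : Claim_equal_makeFancyString := by
  intro s _
  unfold Spec_makeFancyString makeFancyString makeFancyString_alt
  rw [List.range_eq_range']
  rw [loop_agree s.toList.length s.toList 0 0 [] (by omega) (fun _ => rfl) (by omega)
    (by intro j h1 h2; omega) (by omega)]
  simp
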